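-- pv_equiv track=rewrite | github.com/glhuilli/newvelles | newvelles/analysis/concepts_analysis.py | _generate_summary_title
-- ===== SOURCE A (Python) =====
-- from typing import Dict, Iterable, NamedTuple, List
--
-- def _generate_summary_title(terms: List[str]) -> str:
--     """
--     Keep longest terms that include other terms in the summarized title.
--
--     Note that inclusion in this case is a simple full string matching, not based on regex.
--     """
--     # Sort list by length of items in descending order
--     terms.sort(key=lambda s: len(s.split()), reverse=True)
--
--     is_included = [False] * len(terms)
--     for i in range(len(terms)):
--         for j in range(i + 1, len(terms)):
--             if set(terms[j].split()).issubset(set(terms[i].split())):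
--                 is_included[j] = True
--
--     # Use all that are not marked as included
--     return ' '.join(term for term, included in zip(terms, is_included) if not included)
-- ===== SOURCE B (Python) =====
-- from typing import List
--
-- def _generate_summary_title(terms: List[str]) -> str:
--     """Single forward pass over the sorted terms keeping a survivor list; a term
--     survives iff its word-set is not a subset of any already-kept term's word-set
--     (equivalent to A's pairwise marking by transitivity of set inclusion)."""
--     terms.sort(key=lambda s: len(s.split()), reverse=True)
--     kept: List[str] = []
--     kept_sets: List[set] = []
--     for term in terms:
--         ws = set(term.split())
--         if not any(ws <= ks for ks in kept_sets):
--             kept.append(term)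
--             kept_sets.append(ws)
--     return ' '.join(kept)
-- ===== Notes on version B (the rewrite author's own statement) =====
-- stated objective: alternative
-- what changed: Replaces A's full pairwise subset-marking pass (boolean inclusion array over all i<j pairs) by a single forward pass over the sorted terms that maintains a growing survivor list and its word-sets, keeping a term iff it is not a subset of an already-kept term; equivalent by transitivity of set inclusion.
import Mathlib
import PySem

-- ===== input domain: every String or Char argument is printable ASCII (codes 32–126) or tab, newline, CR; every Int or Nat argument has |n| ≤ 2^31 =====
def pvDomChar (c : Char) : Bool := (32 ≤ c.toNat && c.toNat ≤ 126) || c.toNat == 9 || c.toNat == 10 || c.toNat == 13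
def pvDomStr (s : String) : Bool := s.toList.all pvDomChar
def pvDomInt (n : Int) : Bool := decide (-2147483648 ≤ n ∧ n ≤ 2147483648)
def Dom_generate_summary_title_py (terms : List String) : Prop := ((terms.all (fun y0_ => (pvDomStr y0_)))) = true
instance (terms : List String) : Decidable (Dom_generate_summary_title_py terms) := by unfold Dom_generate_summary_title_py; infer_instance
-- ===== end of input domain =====

-- B replaces A's full pairwise boolean-marking pass by a single forward pass keeping a
-- survivor list (equivalent by transitivity of set inclusion); both A and B sort the
-- argument list in place in Python — the equivalence proved here is about the return value.

-- ===== PORT A =====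
-- Python indices produced by range() are always in range here, so pyGetD with default "" is exact.
def generate_summary_title_py (terms : List String) : String :=
  let ts := PySem.List.sorted terms (fun s => ((PySem.Str.split₀ s).length : Int)) true
  let n : Int := (ts.length : Int)
  let init : List Bool := List.replicate ts.length false
  let arr := (PySem.List.pyRange 0 n).foldl (fun acc i =>
      (PySem.List.pyRange (i + 1) n).foldl (fun acc2 j =>
        if PySem.Set.issubset (PySem.Set.ofList (PySem.Str.split₀ (PySem.List.pyGetD ts j "")))
             (PySem.Set.ofList (PySem.Str.split₀ (PySem.List.pyGetD ts i ""))) = true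
        then acc2.set j.toNat true else acc2) acc) init
  PySem.Str.join " " (((ts.zip arr).filter (fun p => !p.2)).map (fun p => p.1))

-- ===== PORT B =====
def generate_summary_title_py_alt (terms : List String) : String :=
  let ts := PySem.List.sorted terms (fun s => ((PySem.Str.split₀ s).length : Int)) true
  let st := ts.foldl (fun (acc : List String × List (PySem.Set String)) term =>
      let ws := PySem.Set.ofList (PySem.Str.split₀ term)
      if acc.2.any (fun ks => PySem.Set.issubset ws ks) then acc
      else (acc.1 ++ [term], acc.2 ++ [ws])) (([], []) : List String × List (PySem.Set String))
  PySem.Str.join " " st.1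

-- ===== PRECONDITION & SPEC =====
def Spec_generate_summary_title_py (terms : List String) (out : String) : Prop := out = generate_summary_title_py_alt terms
instance (terms : List String) (out : String) : Decidable (Spec_generate_summary_title_py terms out) := by unfold Spec_generate_summary_title_py; infer_instance

-- ===== CLAIM (what is proved, stated in full; the proofs are below) =====
def Claim_equal_generate_summary_title_py : Prop := ∀ (terms : List String), Dom_generate_summary_title_py terms → Spec_generate_summary_title_py terms (generate_summary_title_py terms)

-- ===== LEMMAS AND PROOFS =====

-- "word-set of t is a subset of word-set of p"
def pvSub (t p : String) : Bool :=
  PySem.Set.issubset (PySem.Set.ofList (PySem.Str.split₀ t)) (PySem.Set.ofList (PySem.Str.split₀ p))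

-- A's result, expressed as a prefix-accumulator recursion (terms seen so far in `prev`).
def pvFilt (prev : List String) : List String → List String
  | [] => []
  | t :: r =>
    if prev.any (fun p => pvSub t p) then pvFilt (prev ++ [t]) r
    else t :: pvFilt (prev ++ [t]) r

-- B's result, expressed as a survivor-set-accumulator recursion.
def pvKeep (ks : List (PySem.Set String)) : List String → List String
  | [] => []
  | t :: r =>
    if ks.any (fun k => PySem.Set.issubset (PySem.Set.ofList (PySem.Str.split₀ t)) k) then pvKeep ks r
    else t :: pvKeep (ks ++ [PySem.Set.ofList (PySem.Str.split₀ t)]) r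

-- The inner-loop step of A's port, abbreviated for the lemmas below (defeq to the port's lambda).
def pvStep (ts : List String) (i : Int) (acc2 : List Bool) (j : Int) : List Bool :=
  if PySem.Set.issubset (PySem.Set.ofList (PySem.Str.split₀ (PySem.List.pyGetD ts j "")))
       (PySem.Set.ofList (PySem.Str.split₀ (PySem.List.pyGetD ts i ""))) = true
  then acc2.set j.toNat true else acc2

lemma pvStep_length (ts : List String) (i : Int) (acc : List Bool) (j : Int) :
    (pvStep ts i acc j).length = acc.length := by
  unfold pvStep; split <;> simp

lemma pvInner_length (ts : List String) (i : Int) (l : List Int) (acc : List Bool) :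
    (l.foldl (pvStep ts i) acc).length = acc.length := by
  induction l generalizing acc with
  | nil => rfl
  | cons j l ih => simp [List.foldl_cons, ih, pvStep_length]

lemma pvOuter_length (ts : List String) (l : List Int) (acc : List Bool) :
    (l.foldl (fun acc i => (PySem.List.pyRange (i + 1) (ts.length : Int)).foldl (pvStep ts i) acc) acc).length
      = acc.length := by
  induction l generalizing acc with
  | nil => rfl
  | cons i l ih => simp [List.foldl_cons, ih, pvInner_length]

lemma pvInner_getD (ts : List String) (i : Int) :
    ∀ (m a : Nat) (acc : List Bool), acc.length = ts.length →
      ts.length - a = m → ∀ (k : Nat), k < ts.length →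
      ((PySem.List.pyRange (a : Int) (ts.length : Int)).foldl (pvStep ts i) acc)[k]?.getD false
        = (acc[k]?.getD false ||
           (decide (a ≤ k) && pvSub (ts[k]?.getD "") (PySem.List.pyGetD ts i ""))) := by
  intro m
  induction m with
  | zero =>
    intro a acc hlen hm k hk
    have hna : (ts.length : Int) ≤ (a : Int) := by exact_mod_cast Int.ofNat_le.mpr (by omega)
    rw [PySem.List.pyRange_one_eq_nil hna, List.foldl_nil]
    have hak : ¬ (a ≤ k) := by omega
    simp [hak]
  | succ m ih =>
    intro a acc hlen hm k hk
    have hlt : ((a : Nat) : Int) < (ts.length : Int) := by exact_mod_cast (by omega : a < ts.length)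
    rw [PySem.List.pyRange_one_cons hlt, List.foldl_cons]
    have hcast : ((a : Nat) : Int) + 1 = (((a + 1 : Nat)) : Int) := by push_cast; ring
    rw [hcast]
    rw [ih (a + 1) (pvStep ts i acc (a : Int)) (by rw [pvStep_length]; exact hlen) (by omega) k hk]
    have hstep : (pvStep ts i acc (a : Int))[k]?.getD false
        = (acc[k]?.getD false ||
           (decide (a = k) && pvSub (ts[k]?.getD "") (PySem.List.pyGetD ts i ""))) := by
      unfold pvStep
      have hpg : PySem.List.pyGetD ts ((a : Nat) : Int) "" = ts[a]?.getD "" := by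
        rw [PySem.List.pyGetD_natCast, List.getD_eq_getElem?_getD]
      have htn : ((a : Nat) : Int).toNat = a := by omega
      have hcond : (PySem.Set.issubset (PySem.Set.ofList (PySem.Str.split₀ (ts[a]?.getD "")))
            (PySem.Set.ofList (PySem.Str.split₀ (PySem.List.pyGetD ts i ""))) = true)
          = (pvSub (ts[a]?.getD "") (PySem.List.pyGetD ts i "") = true) := rfl
      rw [hpg, htn]
      split_ifs with hs
      · have hs' : pvSub (ts[a]?.getD "") (PySem.List.pyGetD ts i "") = true := hs
        by_cases hak : a = k
        · subst hak
          have hget : ts[a]?.getD "" = ts[a] := by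
            simp [List.getElem?_eq_getElem hk]
          rw [hget] at hs'
          simp [hlen, hk, hs']
        · simp [hak]
      · have hs' : pvSub (ts[a]?.getD "") (PySem.List.pyGetD ts i "") = false :=
          Bool.eq_false_iff.mpr hs
        by_cases hak : a = k
        · subst hak
          rw [hs']
          simp
        · simp [hak]
    rw [hstep]
    cases hS : pvSub (ts[k]?.getD "") (PySem.List.pyGetD ts i "") with
    | false => simp
    | true =>
      simp only [Bool.and_true]
      by_cases h1 : a = k
      · simp [h1]
      · by_cases h2 : a + 1 ≤ k
        · have h3 : a ≤ k := by omega
          simp [h1, h2, h3]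
        · have h3 : ¬ a ≤ k := by omega
          simp [h1, h2, h3]

-- merging the head index into a range-any
lemma pvRangeAny_cons (s : Nat → Bool) (a k : Nat) :
    ((decide (a + 1 ≤ k) && s a) || (List.range k).any (fun i => decide (a + 1 ≤ i) && s i))
      = (List.range k).any (fun i => decide (a ≤ i) && s i) := by
  rw [Bool.eq_iff_iff]
  simp only [Bool.or_eq_true, Bool.and_eq_true, List.any_eq_true, List.mem_range, decide_eq_true_eq]
  constructor
  · rintro (⟨h1, h2⟩ | ⟨i, hik, hai, hsi⟩)
    · exact ⟨a, by omega, by omega, h2⟩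
    · exact ⟨i, hik, by omega, hsi⟩
  · rintro ⟨i, hik, hai, hsi⟩
    by_cases hia : i = a
    · subst hia; exact Or.inl ⟨by omega, hsi⟩
    · exact Or.inr ⟨i, hik, by omega, hsi⟩

lemma pvOuter_getD (ts : List String) :
    ∀ (m a : Nat) (acc : List Bool), acc.length = ts.length →
      ts.length - a = m → ∀ (k : Nat), k < ts.length →
      ((PySem.List.pyRange (a : Int) (ts.length : Int)).foldl
          (fun acc i => (PySem.List.pyRange (i + 1) (ts.length : Int)).foldl (pvStep ts i) acc) acc)[k]?.getD false
        = (acc[k]?.getD false ||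
           (List.range k).any (fun i => decide (a ≤ i) &&
              pvSub (ts[k]?.getD "") (ts[i]?.getD ""))) := by
  intro m
  induction m with
  | zero =>
    intro a acc hlen hm k hk
    have hna : (ts.length : Int) ≤ (a : Int) := by exact_mod_cast Int.ofNat_le.mpr (by omega)
    rw [PySem.List.pyRange_one_eq_nil hna, List.foldl_nil]
    have hnone : (List.range k).any (fun i => decide (a ≤ i) &&
        pvSub (ts[k]?.getD "") (ts[i]?.getD "")) = false := by
      simp only [List.any_eq_false]
      intro i hi
      simp only [List.mem_range] at hi
      have : ¬ (a ≤ i) := by omega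
      simp [this]
    rw [hnone]
    simp
  | succ m ih =>
    intro a acc hlen hm k hk
    have hlt : ((a : Nat) : Int) < (ts.length : Int) := by exact_mod_cast (by omega : a < ts.length)
    rw [PySem.List.pyRange_one_cons hlt, List.foldl_cons]
    have hcast : ((a : Nat) : Int) + 1 = (((a + 1 : Nat)) : Int) := by push_cast; ring
    rw [hcast]
    rw [ih (a + 1) _ (by rw [pvInner_length]; exact hlen) (by omega) k hk]
    rw [pvInner_getD ts ((a : Nat) : Int) (ts.length - (a + 1)) (a + 1) acc hlen rfl k hk]
    have hpg : PySem.List.pyGetD ts ((a : Nat) : Int) "" = ts[a]?.getD "" := by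
      rw [PySem.List.pyGetD_natCast, List.getD_eq_getElem?_getD]
    rw [hpg]
    cases hacc : acc[k]?.getD false with
    | true => simp
    | false =>
      simp only [Bool.false_or]
      exact pvRangeAny_cons (fun i => pvSub (ts[k]?.getD "") (ts[i]?.getD "")) a k

-- any over an index range equals any over the take-prefix
lemma pvAny_range_getD (ts : List String) (f : String → Bool) :
    ∀ (k : Nat), k ≤ ts.length →
      (List.range k).any (fun i => f (ts[i]?.getD "")) = (ts.take k).any f := by
  intro k
  induction k with
  | zero => intro _; simp
  | succ k ih =>
    intro hk
    have hlt : k < ts.length := by omega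
    rw [List.range_succ, List.take_add_one]
    simp only [List.any_append, ih (by omega)]
    congr 1
    simp [List.getElem?_eq_getElem hlt]

-- A's zip/filter over the characterized boolean list is the prefix recursion pvFilt
lemma pvZipFilt (rest : List String) :
    ∀ (prev : List String) (bs : List Bool), bs.length = rest.length →
      (∀ (k : Nat), k < rest.length →
         bs[k]?.getD false = (prev ++ rest.take k).any (fun p => pvSub (rest[k]?.getD "") p)) →
      ((rest.zip bs).filter (fun p => !p.2)).map (fun p => p.1) = pvFilt prev rest := by
  induction rest with
  | nil => intro prev bs _ _; simp [pvFilt]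
  | cons t r ih =>
    intro prev bs hlen hchar
    cases bs with
    | nil => simp at hlen
    | cons b bs' =>
      have hb : b = prev.any (fun p => pvSub t p) := by
        have := hchar 0 (by simp)
        simpa using this
      have hrec : ((r.zip bs').filter (fun p => !p.2)).map (fun p => p.1) = pvFilt (prev ++ [t]) r := by
        apply ih (prev ++ [t]) bs' (by simpa using hlen)
        intro k hk
        have := hchar (k + 1) (by simp; omega)
        simpa [List.take_succ_cons, List.append_assoc] using this
      rw [List.zip_cons_cons, pvFilt]
      cases hany : prev.any (fun p => pvSub t p) with
      | true =>
        rw [if_pos rfl, ← hrec, hb, hany]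
        simp
      | false =>
        rw [if_neg (by simp), ← hrec, hb, hany]
        simp

-- B's fold is the survivor recursion pvKeep
lemma pvFoldKeep (ts : List String) :
    ∀ (acc : List String × List (PySem.Set String)),
      (ts.foldl (fun (acc : List String × List (PySem.Set String)) term =>
        let ws := PySem.Set.ofList (PySem.Str.split₀ term)
        if acc.2.any (fun ks => PySem.Set.issubset ws ks) then acc
        else (acc.1 ++ [term], acc.2 ++ [ws])) acc).1 = acc.1 ++ pvKeep acc.2 ts := by
  induction ts with
  | nil => intro acc; simp [pvKeep]
  | cons t r ih =>
    intro acc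
    have hred : (let ws := PySem.Set.ofList (PySem.Str.split₀ t)
        if acc.2.any (fun ks => PySem.Set.issubset ws ks) then acc
        else (acc.1 ++ [t], acc.2 ++ [ws]))
        = (if acc.2.any (fun ks => PySem.Set.issubset (PySem.Set.ofList (PySem.Str.split₀ t)) ks) then acc
           else (acc.1 ++ [t], acc.2 ++ [PySem.Set.ofList (PySem.Str.split₀ t)])) := rfl
    rw [List.foldl_cons, ih, hred, pvKeep]
    cases hany : acc.2.any (fun ks => PySem.Set.issubset (PySem.Set.ofList (PySem.Str.split₀ t)) ks) with
    | true => rfl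
    | false =>
      rw [if_neg (by simp), if_neg (by simp)]
      simp

-- transitivity: filtering against all previous terms = filtering against kept survivors only
lemma pvFilt_eq_pvKeep (ts : List String) :
    ∀ (prev : List String) (ks : List (PySem.Set String)),
      (∀ s ∈ ks, ∃ p ∈ prev, s = PySem.Set.ofList (PySem.Str.split₀ p)) →
      (∀ p ∈ prev, ∃ s ∈ ks, PySem.Set.issubset (PySem.Set.ofList (PySem.Str.split₀ p)) s = true) →
      pvFilt prev ts = pvKeep ks ts := by
  induction ts with
  | nil => intro _ _ _ _; rfl
  | cons t r ih =>
    intro prev ks hks hcover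
    have hiff : prev.any (fun p => pvSub t p)
        = ks.any (fun k => PySem.Set.issubset (PySem.Set.ofList (PySem.Str.split₀ t)) k) := by
      rw [Bool.eq_iff_iff]
      simp only [List.any_eq_true]
      constructor
      · rintro ⟨p, hp, hsub⟩
        obtain ⟨s, hs, hsub2⟩ := hcover p hp
        refine ⟨s, hs, ?_⟩
        simp only [pvSub, PySem.Set.issubset_iff] at hsub hsub2 ⊢
        intro x hx; exact hsub2 x (hsub x hx)
      · rintro ⟨s, hs, hsub⟩
        obtain ⟨p, hp, rfl⟩ := hks s hs
        exact ⟨p, hp, hsub⟩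
    rw [pvFilt, pvKeep, ← hiff]
    cases hany : prev.any (fun p => pvSub t p) with
    | true =>
      rw [if_pos rfl, if_pos rfl]
      apply ih (prev ++ [t]) ks
      · intro s hs
        obtain ⟨p, hp, rfl⟩ := hks s hs
        exact ⟨p, by simp [hp], rfl⟩
      · intro p hp
        rcases List.mem_append.mp hp with hp' | hp'
        · exact hcover p hp'
        · have hpt : p = t := by simpa using hp'
          subst hpt
          rw [hany] at hiff
          have h2 := hiff.symm
          simp only [List.any_eq_true] at h2
          obtain ⟨s, hs, hsub⟩ := h2
          exact ⟨s, hs, hsub⟩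
    | false =>
      rw [if_neg (by simp), if_neg (by simp)]
      congr 1
      apply ih (prev ++ [t]) (ks ++ [PySem.Set.ofList (PySem.Str.split₀ t)])
      · intro s hs
        rcases List.mem_append.mp hs with hs' | hs'
        · obtain ⟨p, hp, rfl⟩ := hks s hs'
          exact ⟨p, by simp [hp], rfl⟩
        · exact ⟨t, by simp, by simpa using hs'⟩
      · intro p hp
        rcases List.mem_append.mp hp with hp' | hp'
        · obtain ⟨s, hs, hsub⟩ := hcover p hp'
          exact ⟨s, by simp [hs], hsub⟩
        · have hpt : p = t := by simpa using hp'
          subst hpt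
          refine ⟨PySem.Set.ofList (PySem.Str.split₀ p), by simp, ?_⟩
          simp [PySem.Set.issubset_iff]

-- ===== VERDICT (by name: the statement is the Claim_ definition above) =====
theorem generate_summary_title_py_spec : Claim_equal_generate_summary_title_py := by
  intro terms _
  unfold Spec_generate_summary_title_py generate_summary_title_py generate_summary_title_py_alt
  set ts := PySem.List.sorted terms (fun s => ((PySem.Str.split₀ s).length : Int)) true with hts
  have harrlen : ((PySem.List.pyRange ((0 : Nat) : Int) (ts.length : Int)).foldl
      (fun acc i => (PySem.List.pyRange (i + 1) (ts.length : Int)).foldl (pvStep ts i) acc)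
      (List.replicate ts.length false)).length = ts.length := by
    rw [pvOuter_length]; simp
  have hchar : ∀ (k : Nat), k < ts.length →
      ((PySem.List.pyRange ((0 : Nat) : Int) (ts.length : Int)).foldl
        (fun acc i => (PySem.List.pyRange (i + 1) (ts.length : Int)).foldl (pvStep ts i) acc)
        (List.replicate ts.length false))[k]?.getD false
      = (([] ++ ts.take k).any (fun p => pvSub (ts[k]?.getD "") p)) := by
    intro k hk
    rw [pvOuter_getD ts ts.length 0 (List.replicate ts.length false) (by simp) (by omega) k hk]
    have hinit : (List.replicate ts.length false)[k]?.getD false = false := by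
      simp [hk]
    rw [hinit, Bool.false_or, List.nil_append]
    have hfg : (fun i => decide (0 ≤ i) && pvSub (ts[k]?.getD "") (ts[i]?.getD ""))
        = (fun i => pvSub (ts[k]?.getD "") (ts[i]?.getD "")) := by
      funext i; simp
    rw [hfg]
    exact pvAny_range_getD ts (fun p => pvSub (ts[k]?.getD "") p) k (by omega)
  have hA : ((ts.zip ((PySem.List.pyRange ((0 : Nat) : Int) (ts.length : Int)).foldl
      (fun acc i => (PySem.List.pyRange (i + 1) (ts.length : Int)).foldl (pvStep ts i) acc)
      (List.replicate ts.length false))).filter (fun p => !p.2)).map (fun p => p.1)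
      = pvFilt [] ts := pvZipFilt ts [] _ harrlen hchar
  have hB : (ts.foldl (fun (acc : List String × List (PySem.Set String)) term =>
      let ws := PySem.Set.ofList (PySem.Str.split₀ term)
      if acc.2.any (fun ks => PySem.Set.issubset ws ks) then acc
      else (acc.1 ++ [term], acc.2 ++ [ws])) (([], []) : List String × List (PySem.Set String))).1
      = pvKeep [] ts := by
    rw [pvFoldKeep ts (([], []) : List String × List (PySem.Set String))]
    simp
  exact congrArg (PySem.Str.join " ")
    (hA.trans ((pvFilt_eq_pvKeep ts [] [] (by simp) (by simp)).trans hB.symm))
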